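-- pv_equiv track=rewrite | github.com/tcjdsg/GA | util/utils.py | getTwoDimensionListIndex
-- ===== SOURCE A (Python) =====
-- def getTwoDimensionListIndex(L, value):
--     index1 = -1
--     index2 = -1
--     """获得二维列表某个值的一维索引值的另一种方法"""
--     for i in range(len(L)):
--         for j in range(len(L[i])):
--             if len(L[i][j]):
--                 for m in range(len(L[i][j])):
--                     if L[i][j][m] == value:
--                         index1 = i
--                         index2 = j
--     return index1, index2
-- ===== SOURCE B (Python) =====
-- def getTwoDimensionListIndex(L, value):
--     for i, row in reversed(list(enumerate(L))):
--         for j, cell in reversed(list(enumerate(row))):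
--             if any(x == value for x in cell):
--                 return (i, j)
--     return (-1, -1)
-- ===== Notes on version B (the rewrite author's own statement) =====
-- stated objective: idiomatic
-- what changed: Replaces A's exhaustive forward triple-loop that keeps overwriting the answer with a backward scan over reversed enumerations that returns immediately at the first (i.e. last) cell containing the value.
import Mathlib
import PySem

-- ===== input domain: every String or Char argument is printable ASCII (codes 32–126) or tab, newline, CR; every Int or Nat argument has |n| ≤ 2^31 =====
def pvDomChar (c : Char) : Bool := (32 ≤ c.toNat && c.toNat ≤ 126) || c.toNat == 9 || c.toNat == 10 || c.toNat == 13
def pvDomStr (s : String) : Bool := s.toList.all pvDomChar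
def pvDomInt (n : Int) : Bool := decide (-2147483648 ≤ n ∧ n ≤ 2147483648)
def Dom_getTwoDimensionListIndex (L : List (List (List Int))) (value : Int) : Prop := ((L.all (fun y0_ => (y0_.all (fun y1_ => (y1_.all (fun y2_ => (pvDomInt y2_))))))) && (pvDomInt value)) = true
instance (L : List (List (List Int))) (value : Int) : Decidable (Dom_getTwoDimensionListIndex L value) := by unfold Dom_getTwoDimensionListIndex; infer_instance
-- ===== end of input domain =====

-- B replaces A's exhaustive forward triple-loop (which keeps overwriting the answer)
-- with an early-exit backward scan over reversed enumerations; return value equivalence only.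

-- ===== PORT A =====
def getTwoDimensionListIndex (L : List (List (List Int))) (value : Int) : Int × Int :=
  (List.range L.length).foldl (fun st i =>
    let Li := L.getD i []
    (List.range Li.length).foldl (fun st j =>
      let Lij := Li.getD j []
      if Lij.length ≠ 0 then
        (List.range Lij.length).foldl (fun st m =>
          if Lij.getD m 0 = value then ((i : Int), (j : Int)) else st) st
      else st) st) (-1, -1)

-- ===== PORT B =====
def pvAltInner (value : Int) : List (Int × List Int) → Option Int
  | [] => none
  | (j, cell) :: rest =>
      if cell.any (fun x => x == value) then some j else pvAltInner value rest

def pvAltOuter (value : Int) : List (Int × List (List Int)) → Int × Int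
  | [] => (-1, -1)
  | (i, row) :: rest =>
      match pvAltInner value (PySem.List.enumerate row).reverse with
      | some j => (i, j)
      | none => pvAltOuter value rest

def getTwoDimensionListIndex_alt (L : List (List (List Int))) (value : Int) : Int × Int :=
  pvAltOuter value (PySem.List.enumerate L).reverse

-- ===== PRECONDITION & SPEC =====
def Spec_getTwoDimensionListIndex (L : List (List (List Int))) (value : Int) (out : Int × Int) : Prop := out = getTwoDimensionListIndex_alt L value
instance (L : List (List (List Int))) (value : Int) (out : Int × Int) : Decidable (Spec_getTwoDimensionListIndex L value out) := by unfold Spec_getTwoDimensionListIndex; infer_instance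

-- ===== CLAIM (what is proved, stated in full; the proofs are below) =====
def Claim_equal_getTwoDimensionListIndex : Prop := ∀ (L : List (List (List Int))) (value : Int), Dom_getTwoDimensionListIndex L value → Spec_getTwoDimensionListIndex L value (getTwoDimensionListIndex L value)

-- ===== LEMMAS AND PROOFS =====

-- folding a constant-answer "if" over a list: last match wins, but the value is the same p
theorem pv_foldl_if_any (v : Int) (p : Int × Int) :
    ∀ (c : List Int) (st : Int × Int),
      c.foldl (fun st x => if x = v then p else st) st
        = if c.any (fun x => x == v) then p else st := by
  intro c
  induction c with
  | nil => intro st; simp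
  | cons x rest ih =>
      intro st
      simp only [List.foldl_cons, List.any_cons, ih]
      by_cases hx : x = v <;> by_cases hr : rest.any (fun y => y == v) = true <;>
        simp [hx, hr]

-- index loop over range(len(xs)) with getD = structural foldl over xs
theorem pv_foldl_range_getD {α β : Type} (d : α) (f : β → α → β) :
    ∀ (xs : List α) (init : β),
      (List.range xs.length).foldl (fun st m => f st (xs.getD m d)) init
        = xs.foldl f init := by
  intro xs
  induction xs with
  | nil => intro init; simp
  | cons x rest ih =>
      intro init
      simp only [List.length_cons, List.range_succ_eq_map, List.foldl_cons,
        List.foldl_map, List.getD_cons_zero, List.getD_cons_succ]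
      exact ih (f init x)

-- A's innermost loop (with its redundant non-empty guard) = "contains value" test
theorem pv_inner (c : List Int) (v : Int) (p st : Int × Int) :
    (if c.length ≠ 0 then
        (List.range c.length).foldl (fun st m => if c.getD m 0 = v then p else st) st
      else st)
      = if c.any (fun x => x == v) then p else st := by
  by_cases hc : c = []
  · simp [hc]
  · have hlen : c.length ≠ 0 := by simpa [List.length_eq_zero_iff] using hc
    rw [if_pos hlen, pv_foldl_range_getD 0 (fun st x => if x = v then p else st) c st,
      pv_foldl_if_any]

-- A's middle loop over a row = B's reverse-first search over that row
theorem pv_middle (v : Int) (i : Nat) :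
    ∀ (row : List (List Int)) (st : Int × Int),
      ((List.range row.length).foldl (fun st j =>
          if (row.getD j []).length ≠ 0 then
            (List.range (row.getD j []).length).foldl (fun st m =>
              if (row.getD j []).getD m 0 = v then ((i : Int), (j : Int)) else st) st
          else st) st)
        = match pvAltInner v (PySem.List.enumerate row).reverse with
          | some j => ((i : Int), j)
          | none => st := by
  intro row
  induction row using List.reverseRecOn with
  | nil => intro st; simp [PySem.List.enumerate, pvAltInner]
  | append_singleton row c ih =>
      intro st
      simp only [List.length_append, List.length_singleton, List.range_succ,
        List.foldl_append, List.foldl_cons, List.foldl_nil]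
      rw [PySem.List.foldl_congr_mem (List.range row.length)
        (fun st j =>
          if ((row ++ [c]).getD j []).length ≠ 0 then
            (List.range ((row ++ [c]).getD j []).length).foldl (fun st m =>
              if ((row ++ [c]).getD j []).getD m 0 = v then ((i : Int), (j : Int)) else st) st
          else st)
        (fun st j =>
          if (row.getD j []).length ≠ 0 then
            (List.range (row.getD j []).length).foldl (fun st m =>
              if (row.getD j []).getD m 0 = v then ((i : Int), (j : Int)) else st) st
          else st)
        st
        (by
          intro acc j hj
          simp only [List.getD_append row [c] [] j (List.mem_range.mp hj)])]
      rw [ih st]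
      rw [List.getD_append_right row [c] [] row.length (Nat.le_refl _)]
      simp only [Nat.sub_self, List.getD_cons_zero]
      rw [pv_inner c v ((i : Int), (row.length : Int)) _]
      rw [PySem.List.enumerate_append, List.reverse_append]
      simp only [PySem.List.enumerate, List.reverse_singleton, List.singleton_append,
        pvAltInner]
      by_cases h : c.any (fun x => x == v) = true <;> simp [h]

-- A's whole computation = B's reverse-first search over the rows
theorem pv_outer (v : Int) :
    ∀ (L : List (List (List Int))),
      ((List.range L.length).foldl (fun st i =>
          (List.range (L.getD i []).length).foldl (fun st j =>
            if ((L.getD i []).getD j []).length ≠ 0 then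
              (List.range ((L.getD i []).getD j []).length).foldl (fun st m =>
                if ((L.getD i []).getD j []).getD m 0 = v then ((i : Int), (j : Int)) else st) st
            else st) st) (-1, -1))
        = pvAltOuter v (PySem.List.enumerate L).reverse := by
  intro L
  induction L using List.reverseRecOn with
  | nil => simp [PySem.List.enumerate, pvAltOuter]
  | append_singleton L row ih =>
      simp only [List.length_append, List.length_singleton, List.range_succ,
        List.foldl_append, List.foldl_cons, List.foldl_nil]
      rw [PySem.List.foldl_congr_mem (List.range L.length)
        (fun st i =>
          (List.range ((L ++ [row]).getD i []).length).foldl (fun st j =>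
            if (((L ++ [row]).getD i []).getD j []).length ≠ 0 then
              (List.range (((L ++ [row]).getD i []).getD j []).length).foldl (fun st m =>
                if (((L ++ [row]).getD i []).getD j []).getD m 0 = v then ((i : Int), (j : Int)) else st) st
            else st) st)
        (fun st i =>
          (List.range (L.getD i []).length).foldl (fun st j =>
            if ((L.getD i []).getD j []).length ≠ 0 then
              (List.range ((L.getD i []).getD j []).length).foldl (fun st m =>
                if ((L.getD i []).getD j []).getD m 0 = v then ((i : Int), (j : Int)) else st) st
            else st) st)
        (-1, -1)
        (by
          intro acc i hi
          simp only [List.getD_append L [row] [] i (List.mem_range.mp hi)])]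
      rw [ih]
      rw [List.getD_append_right L [row] [] L.length (Nat.le_refl _)]
      simp only [Nat.sub_self, List.getD_cons_zero]
      rw [pv_middle v L.length row _]
      rw [PySem.List.enumerate_append, List.reverse_append]
      simp only [PySem.List.enumerate, List.reverse_singleton, List.singleton_append,
        pvAltOuter]
      rcases h : pvAltInner v (PySem.List.enumerate row).reverse with _ | j
      · rfl
      · norm_num

-- ===== VERDICT (by name: the statement is the Claim_ definition above) =====
theorem getTwoDimensionListIndex_spec : Claim_equal_getTwoDimensionListIndex := by
  intro L v _
  unfold Spec_getTwoDimensionListIndex getTwoDimensionListIndex getTwoDimensionListIndex_alt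
  exact pv_outer v L
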